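-- pv_equiv track=rewrite | github.com/PeterFile/my-common-skills | multi-agent-orchestration/scripts/dispatch_batch.py | allocate_windows
-- ===== SOURCE A (Python) =====
-- from typing import List, Dict, Optional, Any, Set
--
-- def allocate_windows(
--     dispatch_units: List[Dict[str, Any]],
--     max_windows: int = 9,
--     existing_mapping: Optional[Dict[str, str]] = None
-- ) -> Dict[str, str]:
--     """
--     Allocate tmux windows for dispatch units.
--
--     Returns mapping of dispatch_unit_id -> window_name.
--     Each dispatch unit gets exactly one window.
--
--     Requirements: 6.1, 6.3
--     """
--     window_mapping: Dict[str, str] = {}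
--     existing_mapping = existing_mapping or {}
--
--     for unit in dispatch_units:
--         task_id = unit.get("task_id", "")
--         if not task_id or task_id in window_mapping:
--             continue
--         if len(window_mapping) >= max_windows:
--             break
--         window_name = existing_mapping.get(task_id) or f"task-{task_id}"
--         window_mapping[task_id] = window_name
--
--     return window_mapping
-- ===== SOURCE B (Python) =====
-- def allocate_windows(dispatch_units, max_windows=9, existing_mapping=None):
--     existing = existing_mapping or {}
--     # pass 1: ordered distinct non-empty task ids
--     seen = set()
--     ordered = []
--     for unit in dispatch_units:
--         tid = unit.get("task_id", "")
--         if tid and tid not in seen: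
--             seen.add(tid)
--             ordered.append(tid)
--     # pass 2: cap, then assign names
--     return {tid: existing.get(tid) or f"task-{tid}"
--             for tid in ordered[:max(0, max_windows)]}
-- ===== Notes on version B (the rewrite author's own statement) =====
-- stated objective: alternative
-- what changed: A fuses dedup, capping (via break on dict size) and name assignment into one stateful loop over a growing dict; B first builds the ordered list of distinct non-empty task ids in a dedup pass, then slices it to max(0, max_windows) and builds the result with a single dict comprehension.
import Mathlib
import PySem

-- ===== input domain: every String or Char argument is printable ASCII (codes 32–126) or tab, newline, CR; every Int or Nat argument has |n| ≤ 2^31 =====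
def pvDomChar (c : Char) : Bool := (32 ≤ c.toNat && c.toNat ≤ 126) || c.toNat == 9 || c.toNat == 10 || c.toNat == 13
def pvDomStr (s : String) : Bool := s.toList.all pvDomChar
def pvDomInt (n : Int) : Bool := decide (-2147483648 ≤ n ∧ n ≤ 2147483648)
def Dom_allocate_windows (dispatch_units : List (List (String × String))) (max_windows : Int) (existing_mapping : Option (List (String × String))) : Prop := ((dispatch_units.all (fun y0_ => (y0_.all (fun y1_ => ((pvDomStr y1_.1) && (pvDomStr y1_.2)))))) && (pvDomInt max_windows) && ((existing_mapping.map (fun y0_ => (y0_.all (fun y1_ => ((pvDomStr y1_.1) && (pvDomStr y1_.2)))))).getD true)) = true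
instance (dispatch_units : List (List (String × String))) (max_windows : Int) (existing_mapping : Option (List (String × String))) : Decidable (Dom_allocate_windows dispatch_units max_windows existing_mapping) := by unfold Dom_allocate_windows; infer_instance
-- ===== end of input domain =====

-- B replaces A's fused loop (dedup + cap-break + naming over a growing dict) by a dedup pass
-- followed by a slice and a mapping pass; objective: alternative decomposition, same cost.

-- ===== PORT A =====
-- the for-loop with its early break, as structural recursion over (units, window_mapping)
def awLoopA (existing : List (String × String)) (max_windows : Int) :
    List (List (String × String)) → PySem.Dict String String → PySem.Dict String String
  | [], wm => wm
  | unit :: rest, wm =>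
    let task_id := (PySem.Dict.mk unit).getD "task_id" ""
    if task_id = "" ∨ wm.contains task_id then
      awLoopA existing max_windows rest wm
    else if max_windows ≤ (wm.size : Int) then
      wm  -- break
    else
      -- existing_mapping.get(task_id) or f"task-{task_id}"  (`or` also skips an empty string)
      let window_name :=
        match (PySem.Dict.mk existing).get? task_id with
        | some v => if v = "" then "task-" ++ task_id else v
        | none => "task-" ++ task_id
      awLoopA existing max_windows rest (wm.insert task_id window_name)

def allocate_windows (dispatch_units : List (List (String × String))) (max_windows : Int) (existing_mapping : Option (List (String × String))) : List (String × String) :=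
  -- `existing_mapping or {}`: None ↦ {}; an empty dict stays the empty assoc list either way
  let existing := match existing_mapping with | none => [] | some m => m
  (awLoopA existing max_windows dispatch_units PySem.Dict.empty).items

-- ===== PORT B =====
def allocate_windows_alt (dispatch_units : List (List (String × String))) (max_windows : Int) (existing_mapping : Option (List (String × String))) : List (String × String) :=
  let existing := match existing_mapping with | none => [] | some m => m
  -- pass 1: ordered distinct non-empty task ids (seen : set, ordered : list)
  let st := dispatch_units.foldl
    (fun (st : PySem.Set String × List String) unit =>
      let tid := (PySem.Dict.mk unit).getD "task_id" ""
      if tid ≠ "" ∧ ¬ (PySem.Set.contains st.1 tid = true) then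
        (PySem.Set.add st.1 tid, st.2 ++ [tid])
      else st)
    (PySem.Set.empty, [])
  -- pass 2: ordered[:max(0, max_windows)] (cap ≥ 0, so the slice is a take), then assign names
  (st.2.take (max 0 max_windows).toNat).map (fun tid =>
    (tid, match (PySem.Dict.mk existing).get? tid with
          | some v => if v = "" then "task-" ++ tid else v
          | none => "task-" ++ tid))

-- ===== PRECONDITION & SPEC =====
def Spec_allocate_windows (dispatch_units : List (List (String × String))) (max_windows : Int) (existing_mapping : Option (List (String × String))) (out : List (String × String)) : Prop := out = allocate_windows_alt dispatch_units max_windows existing_mapping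
instance (dispatch_units : List (List (String × String))) (max_windows : Int) (existing_mapping : Option (List (String × String))) (out : List (String × String)) : Decidable (Spec_allocate_windows dispatch_units max_windows existing_mapping out) := by unfold Spec_allocate_windows; infer_instance

-- ===== CLAIM (what is proved, stated in full; the proofs are below) =====
def Claim_equal_allocate_windows : Prop := ∀ (dispatch_units : List (List (String × String))) (max_windows : Int) (existing_mapping : Option (List (String × String))), Dom_allocate_windows dispatch_units max_windows existing_mapping → Spec_allocate_windows dispatch_units max_windows existing_mapping (allocate_windows dispatch_units max_windows existing_mapping)

-- ===== LEMMAS AND PROOFS =====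

-- ordered distinct non-empty ids of the remaining units, relative to an already-seen list S
def newIds (S : List String) : List (List (String × String)) → List String
  | [] => []
  | unit :: rest =>
    let t := (PySem.Dict.mk unit).getD "task_id" ""
    if t = "" ∨ t ∈ S then newIds S rest else t :: newIds (t :: S) rest

theorem newIds_congr (S S' : List String) (h : ∀ x, x ∈ S ↔ x ∈ S') :
    ∀ du, newIds S du = newIds S' du := by
  intro du
  induction du generalizing S S' with
  | nil => rfl
  | cons unit rest ih =>
    simp only [newIds]
    by_cases ht : (PySem.Dict.mk unit).getD "task_id" "" = "" ∨
        (PySem.Dict.mk unit).getD "task_id" "" ∈ S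
    · rw [if_pos ht, if_pos (by rcases ht with h1 | h1; exact Or.inl h1; exact Or.inr ((h _).1 h1))]
      exact ih S S' h
    · rw [if_neg ht, if_neg (by
        rintro (h1 | h1); exact ht (Or.inl h1); exact ht (Or.inr ((h _).2 h1)))]
      refine congrArg _ (ih _ _ ?_)
      intro x; simp only [List.mem_cons]
      exact or_congr Iff.rfl (h x)

theorem awLoopA_items (existing : List (String × String)) (mw : Int) :
    ∀ (du : List (List (String × String))) (wm : PySem.Dict String String),
      wm.keys.Nodup →
      (awLoopA existing mw du wm).items =
        wm.items ++ ((newIds wm.keys du).take (mw - wm.size).toNat).map (fun t =>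
          (t, match (PySem.Dict.mk existing).get? t with
              | some v => if v = "" then "task-" ++ t else v
              | none => "task-" ++ t)) := by
  intro du
  induction du with
  | nil => intro wm _; simp [awLoopA, newIds]
  | cons unit rest ih =>
    intro wm hnd
    simp only [awLoopA, newIds]
    by_cases h1 : (PySem.Dict.mk unit).getD "task_id" "" = "" ∨
        wm.contains ((PySem.Dict.mk unit).getD "task_id" "") = true
    · rw [if_pos h1, if_pos (by
        rcases h1 with h | h
        · exact Or.inl h
        · exact Or.inr ((PySem.Dict.contains_iff_mem_keys _ _).1 h))]
      exact ih wm hnd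
    · have hne : (PySem.Dict.mk unit).getD "task_id" "" ≠ "" := fun h => h1 (Or.inl h)
      have hnc : wm.contains ((PySem.Dict.mk unit).getD "task_id" "") = false := by
        cases hcc : wm.contains ((PySem.Dict.mk unit).getD "task_id" "")
        · rfl
        · exact absurd (Or.inr hcc) h1
      have hnmem : (PySem.Dict.mk unit).getD "task_id" "" ∉ wm.keys := fun hm =>
        h1 (Or.inr ((PySem.Dict.contains_iff_mem_keys _ _).2 hm))
      rw [if_neg h1,
          if_neg (show ¬((PySem.Dict.mk unit).getD "task_id" "" = "" ∨
              (PySem.Dict.mk unit).getD "task_id" "" ∈ wm.keys) from by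
            rintro (h | h); exact hne h; exact hnmem h)]
      by_cases h2 : mw ≤ (wm.size : Int)
      · rw [if_pos h2]
        have h0 : (mw - (wm.size : Int)).toNat = 0 := by omega
        rw [h0]
        simp
      · rw [if_neg h2]
        rw [ih _ (PySem.Dict.nodup_keys_insert _ _ _ hnd)]
        rw [PySem.Dict.items_insert_of_not_contains _ _ hnc,
            PySem.Dict.keys_insert_of_not_contains _ _ hnc,
            PySem.Dict.size_insert]
        rw [if_neg (by simp [hnc])]
        rw [newIds_congr (wm.keys ++ [(PySem.Dict.mk unit).getD "task_id" ""])
              ((PySem.Dict.mk unit).getD "task_id" "" :: wm.keys)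
              (by intro x; simp [or_comm]) rest]
        have htk : (mw - (wm.size : Int)).toNat = (mw - ((wm.size : Int) + 1)).toNat + 1 := by omega
        push_cast
        rw [htk, List.take_succ_cons, List.map_cons, List.append_assoc]
        rfl

theorem foldB_snd (du : List (List (String × String))) :
    ∀ (seen : PySem.Set String) (ordered : List String),
      (du.foldl
        (fun (st : PySem.Set String × List String) unit =>
          let tid := (PySem.Dict.mk unit).getD "task_id" ""
          if tid ≠ "" ∧ ¬ (PySem.Set.contains st.1 tid = true) then
            (PySem.Set.add st.1 tid, st.2 ++ [tid])
          else st)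
        (seen, ordered)).2 = ordered ++ newIds seen du := by
  induction du with
  | nil => intro seen ordered; simp [newIds]
  | cons unit rest ih =>
    intro seen ordered
    simp only [List.foldl_cons, newIds]
    by_cases h1 : (PySem.Dict.mk unit).getD "task_id" "" = "" ∨
        (PySem.Dict.mk unit).getD "task_id" "" ∈ seen
    · rw [if_neg (by
        rintro ⟨hne, hnc⟩
        rcases h1 with h | h
        · exact hne h
        · exact hnc ((PySem.Set.contains_iff _ _).2 h))]
      rw [if_pos h1]
      exact ih seen ordered
    · have hne : (PySem.Dict.mk unit).getD "task_id" "" ≠ "" := fun h => h1 (Or.inl h)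
      have hnm : (PySem.Dict.mk unit).getD "task_id" "" ∉ seen := fun h => h1 (Or.inr h)
      rw [if_pos ⟨hne, fun hc => hnm ((PySem.Set.contains_iff _ _).1 hc)⟩]
      rw [if_neg h1]
      rw [ih]
      rw [newIds_congr (PySem.Set.add seen ((PySem.Dict.mk unit).getD "task_id" ""))
            (((PySem.Dict.mk unit).getD "task_id" "") :: seen)
            (by intro x; simp [PySem.Set.mem_add, or_comm]) rest]
      simp

-- ===== VERDICT (by name: the statement is the Claim_ definition above) =====
theorem allocate_windows_spec : Claim_equal_allocate_windows := by
  intro du mw em _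
  unfold Spec_allocate_windows
  simp only [allocate_windows, allocate_windows_alt]
  rw [awLoopA_items _ _ _ _ PySem.Dict.nodup_keys_empty, foldB_snd]
  simp only [PySem.Dict.empty, List.nil_append,
    show ({ items := [] } : PySem.Dict String String).items = ([] : List (String × String)) from rfl,
    show ({ items := [] } : PySem.Dict String String).size = 0 from rfl,
    show ({ items := [] } : PySem.Dict String String).keys = ([] : List String) from rfl,
    PySem.Set.empty]
  have hmx : (mw - ((0 : Nat) : Int)).toNat = (max 0 mw).toNat := by omega
  rw [hmx, List.map_take]
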